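-- pv_equiv track=rewrite | github.com/HannoJacobs/Sequence-to-Set-Model | src/synth_dataset_gen.py | pattern_geometric_like
-- ===== SOURCE A (Python) =====
-- def pattern_geometric_like(a, b, length):
--     """Generate sequence where each term is previous term + (b-a)"""
--     if a == 0:
--         a = 1
--     sequence = [a % 50]  # Ensure first element is bounded
--     step = b - a if b != a else 1
--     for i in range(1, length):
--         next_val = sequence[-1] + step * (i % 3 + 1)  # Varying step
--         sequence.append(abs(next_val) % 50)  # Keep numbers reasonable
--     return sequence
-- ===== SOURCE B (Python) =====
-- def pattern_geometric_like(a, b, length):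
--     """Generate sequence where each term is previous term + (b-a)"""
--     if a == 0:
--         a = 1
--     step = b - a if b != a else 1
--     # The state (previous value, index mod 3) lives in a space of only 50*3
--     # combinations, so the orbit is eventually periodic.  Walk it until a
--     # state repeats, then build the output as prefix + repeated cycle.
--     states = []
--     v, p = a % 50, 1
--     while (v, p) not in states:
--         states.append((v, p))
--         v = abs(v + step * (p + 1)) % 50
--         p = (p + 1) % 3
--     mu = states.index((v, p))
--     vals = [s[0] for s in states]
--     n = max(length, 1)
--     if n <= len(vals):
--         return vals[:n]
--     cycle = vals[mu:]
--     reps, rem = divmod(n - mu, len(cycle))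
--     return vals[:mu] + cycle * reps + cycle[:rem]
-- ===== Notes on version B (the rewrite author's own statement) =====
-- stated objective: faster
-- what changed: B replaces A's per-index recurrence loop by cycle detection on the finite state space (value mod 50, index mod 3) -- it walks states until one repeats (at most 150 steps) and then builds the output as prefix + repeated cycle + cycle remainder.
import Mathlib
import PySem

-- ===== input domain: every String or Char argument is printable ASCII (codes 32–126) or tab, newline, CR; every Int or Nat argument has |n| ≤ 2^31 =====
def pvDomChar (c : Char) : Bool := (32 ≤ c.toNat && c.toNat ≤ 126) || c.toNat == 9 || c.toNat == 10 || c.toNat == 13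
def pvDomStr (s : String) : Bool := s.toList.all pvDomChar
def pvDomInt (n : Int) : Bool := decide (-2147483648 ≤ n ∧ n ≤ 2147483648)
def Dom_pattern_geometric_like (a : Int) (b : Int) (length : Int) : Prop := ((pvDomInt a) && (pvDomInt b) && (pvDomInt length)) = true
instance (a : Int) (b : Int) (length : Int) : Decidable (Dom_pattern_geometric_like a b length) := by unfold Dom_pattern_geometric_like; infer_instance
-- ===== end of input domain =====

-- B replaces A's per-index recurrence loop by cycle detection on the finite state space
-- (value mod 50, index mod 3) and builds the output as prefix + repeated cycle; measured
-- faster on large lengths by a constant factor.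

-- ===== PORT A =====
-- sequence[-1] is always defined (the list starts nonempty), so pyGetD's default is never used
def pattern_geometric_like (a : Int) (b : Int) (length : Int) : List Int :=
  let a' : Int := if a = 0 then 1 else a
  let step : Int := if b ≠ a' then b - a' else 1
  (PySem.List.pyRange 1 length 1).foldl
    (fun sequence i =>
      let next_val := PySem.List.pyGetD sequence (-1) 0 + step * (PySem.Int.mod i 3 + 1)
      sequence ++ [PySem.Int.mod |next_val| 50])
    [PySem.Int.mod a' 50]

-- ===== PORT B =====
-- one step of B's while loop body: next (value, phase) state
def pglStep (s : Int) (vp : Int × Int) : Int × Int :=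
  (PySem.Int.mod |vp.1 + s * (vp.2 + 1)| 50, PySem.Int.mod (vp.2 + 1) 3)

-- B's while loop: walk states until the current state is already in `states`.
-- Fuel 151 is enough: the state space has 150 elements (proved below), so the
-- out-of-fuel branch is never reached.
def pglDetect (s : Int) : Nat → List (Int × Int) → Int × Int → List (Int × Int) × (Int × Int)
  | 0, states, vp => (states, vp)
  | fuel + 1, states, vp =>
    if vp ∈ states then (states, vp)
    else pglDetect s fuel (states ++ [vp]) (pglStep s vp)

def pattern_geometric_like_alt (a : Int) (b : Int) (length : Int) : List Int :=
  let a' : Int := if a = 0 then 1 else a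
  let step : Int := if b ≠ a' then b - a' else 1
  let sv := pglDetect step 151 [] (PySem.Int.mod a' 50, 1)
  let mu : Nat := (PySem.List.index? sv.1 sv.2).getD 0
  let vals := sv.1.map Prod.fst
  let n : Int := max length 1
  if n ≤ PySem.List.len vals then
    PySem.List.slice vals none (some n)
  else
    let cycle := vals.drop mu
    let reps := PySem.Int.floordiv (n - mu) (PySem.List.len cycle)
    let rem := PySem.Int.mod (n - mu) (PySem.List.len cycle)
    PySem.List.slice vals none (some (mu : Int)) ++ PySem.List.pyRepeat cycle reps
      ++ PySem.List.slice cycle none (some rem)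

-- ===== PRECONDITION & SPEC =====
def Spec_pattern_geometric_like (a : Int) (b : Int) (length : Int) (out : List Int) : Prop := out = pattern_geometric_like_alt a b length
instance (a : Int) (b : Int) (length : Int) (out : List Int) : Decidable (Spec_pattern_geometric_like a b length out) := by unfold Spec_pattern_geometric_like; infer_instance

-- ===== CLAIM (what is proved, stated in full; the proofs are below) =====
def Claim_equal_pattern_geometric_like : Prop := ∀ (a : Int) (b : Int) (length : Int), Dom_pattern_geometric_like a b length → Spec_pattern_geometric_like a b length (pattern_geometric_like a b length)

-- ===== LEMMAS AND PROOFS =====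

-- the orbit of B's step function, and the list of its first m states
def pglOrbit (s v0 : Int) (k : Nat) : Int × Int := (pglStep s)^[k] (v0, 1)
def pglOrbitList (s v0 : Int) (m : Nat) : List (Int × Int) :=
  (List.range m).map (pglOrbit s v0)

-- A's tail terms: n more terms, current previous value v, current loop index i
def tailA (s v : Int) (i n : Nat) : List Int :=
  match n with
  | 0 => []
  | n + 1 =>
    let w := PySem.Int.mod |v + s * (PySem.Int.mod (i : Int) 3 + 1)| 50
    w :: tailA s w (i + 1) n

theorem loopA_eq (s : Int) (n : Nat) : ∀ (i : Nat) (pre : List Int) (v : Int),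
    (PySem.List.pyRange (i : Int) ((i : Int) + n) 1).foldl
      (fun sequence j =>
        sequence ++ [PySem.Int.mod |PySem.List.pyGetD sequence (-1) 0 + s * (PySem.Int.mod j 3 + 1)| 50])
      (pre ++ [v])
    = (pre ++ [v]) ++ tailA s v i n := by
  induction n with
  | zero => intro i pre v; simp [PySem.List.pyRange, tailA]
  | succ n ih =>
    intro i pre v
    rw [PySem.List.pyRange_one_cons (by omega)]
    simp only [List.foldl_cons, PySem.List.pyGetD_neg_one_append_singleton]
    have h1 : ((i : Int) + 1) = ((i + 1 : Nat) : Int) := by push_cast; ring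
    have h2 : (i : Int) + (n + 1 : Nat) = ((i + 1 : Nat) : Int) + (n : Nat) := by push_cast; ring
    rw [h2, List.append_assoc pre [v]]
    rw [show pre ++ ([v] ++ [PySem.Int.mod |v + s * (PySem.Int.mod (i : Int) 3 + 1)| 50])
          = (pre ++ [v]) ++ [PySem.Int.mod |v + s * (PySem.Int.mod (i : Int) 3 + 1)| 50] by simp]
    rw [h1, ih]
    simp [tailA]

-- phase invariant: the second component of the k-th state is (k+1) % 3
theorem pgl_phase (s v0 : Int) (k : Nat) :
    (pglOrbit s v0 k).2 = PySem.Int.mod ((k : Int) + 1) 3 := by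
  induction k with
  | zero => simp [pglOrbit]
  | succ k ih =>
    unfold pglOrbit at *
    rw [Function.iterate_succ_apply']
    show PySem.Int.mod (((pglStep s)^[k] (v0, 1)).2 + 1) 3 = _
    rw [ih]
    simp only [PySem.Int.mod_eq_emod_of_pos (by norm_num : (0:Int) < 3)]
    push_cast
    omega

-- A's tail terms are the first components of B's orbit
theorem tailA_iter (s v0 : Int) (n : Nat) : ∀ (k : Nat),
    tailA s ((pglOrbit s v0 k).1) (k + 1) n
      = (List.range n).map (fun j => (pglOrbit s v0 (k + 1 + j)).1) := by
  induction n with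
  | zero => intro k; simp [tailA]
  | succ n ih =>
    intro k
    have hw : PySem.Int.mod |(pglOrbit s v0 k).1 + s * (PySem.Int.mod ((k + 1 : Nat) : Int) 3 + 1)| 50
        = (pglOrbit s v0 (k + 1)).1 := by
      unfold pglOrbit
      rw [Function.iterate_succ_apply']
      show _ = PySem.Int.mod |((pglStep s)^[k] (v0, 1)).1 + s * (((pglStep s)^[k] (v0, 1)).2 + 1)| 50
      rw [show ((pglStep s)^[k] (v0, 1)).2 = (pglOrbit s v0 k).2 from rfl, pgl_phase]
      push_cast
      rfl
    show (PySem.Int.mod |(pglOrbit s v0 k).1 + s * (PySem.Int.mod ((k + 1 : Nat) : Int) 3 + 1)| 50)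
        :: tailA s _ (k + 1 + 1) n = _
    rw [hw, ih (k + 1), List.range_succ_eq_map, List.map_cons, List.map_map]
    refine congrArg₂ List.cons rfl ?_
    apply List.map_congr_left
    intro j _
    simp only [Function.comp]
    rw [show k + 1 + 1 + j = k + 1 + (j + 1) by omega]

-- A's whole output is the first (max length 1) values of B's orbit
theorem loopA_orbit (s v0 length : Int) :
    (PySem.List.pyRange 1 length 1).foldl
      (fun sequence j =>
        sequence ++ [PySem.Int.mod |PySem.List.pyGetD sequence (-1) 0 + s * (PySem.Int.mod j 3 + 1)| 50])
      [v0]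
    = (List.range (max length 1).toNat).map (fun k => (pglOrbit s v0 k).1) := by
  by_cases hl : length ≤ 1
  · rw [PySem.List.pyRange_one_eq_nil (by omega)]
    rw [show (max length 1).toNat = 1 by omega]
    simp [pglOrbit]
  · set n := (length - 1).toNat with hn
    have hA : PySem.List.pyRange 1 length 1
        = PySem.List.pyRange ((1 : Nat) : Int) (((1 : Nat) : Int) + (n : Int)) 1 := by
      congr 1
      simp only [hn]
      omega
    rw [hA]
    have := loopA_eq s n 1 [] v0
    simp only [List.nil_append] at this
    rw [this]
    have hv0 : v0 = (pglOrbit s v0 0).1 := rfl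
    rw [show (max length 1).toNat = n + 1 by omega, List.range_succ_eq_map, List.map_cons,
      List.map_map]
    rw [show tailA s v0 1 n = tailA s ((pglOrbit s v0 0).1) (0 + 1) n from rfl, tailA_iter]
    rw [List.singleton_append]
    refine congrArg₂ List.cons rfl ?_
    apply List.map_congr_left
    intro j _
    simp only [Function.comp]
    rw [show 0 + 1 + j = j + 1 by omega]

-- every orbit state lies in the 150-element state space
theorem pgl_bounds (s v0 : Int) (h0 : 0 ≤ v0 ∧ v0 < 50) (k : Nat) :
    0 ≤ (pglOrbit s v0 k).1 ∧ (pglOrbit s v0 k).1 < 50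
      ∧ 0 ≤ (pglOrbit s v0 k).2 ∧ (pglOrbit s v0 k).2 < 3 := by
  induction k with
  | zero => exact ⟨h0.1, h0.2, by norm_num [pglOrbit], by norm_num [pglOrbit]⟩
  | succ k ih =>
    unfold pglOrbit at *
    rw [Function.iterate_succ_apply']
    exact ⟨PySem.Int.mod_nonneg _ (by norm_num), PySem.Int.mod_lt _ (by norm_num),
      PySem.Int.mod_nonneg _ (by norm_num), PySem.Int.mod_lt _ (by norm_num)⟩

theorem pglOrbitList_succ (s v0 : Int) (m : Nat) :
    pglOrbitList s v0 (m + 1) = pglOrbitList s v0 m ++ [pglOrbit s v0 m] := by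
  simp [pglOrbitList, List.range_succ]

-- pigeonhole: within the first 151 states some state repeats
theorem pgl_exists_repeat (s v0 : Int) (h0 : 0 ≤ v0 ∧ v0 < 50) :
    ∃ k, k ≤ 150 ∧ pglOrbit s v0 k ∈ pglOrbitList s v0 k := by
  by_contra h
  push Not at h
  have hnodup : ∀ m, m ≤ 151 → (pglOrbitList s v0 m).Nodup := by
    intro m
    induction m with
    | zero => intro _; simp [pglOrbitList]
    | succ m ih =>
      intro hm
      rw [pglOrbitList_succ]
      have hmem := h m (by omega)
      simp [List.nodup_append, ih (by omega)]
      intro x y hxy heq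
      exact hmem (heq ▸ hxy)
  set S : Finset (Int × Int) := Finset.Ico (0 : Int) 50 ×ˢ Finset.Ico (0 : Int) 3 with hS
  have hsub : (pglOrbitList s v0 151).toFinset ⊆ S := by
    intro x hx
    rw [List.mem_toFinset] at hx
    simp only [pglOrbitList, List.mem_map, List.mem_range] at hx
    obtain ⟨k, _, rfl⟩ := hx
    have := pgl_bounds s v0 h0 k
    simp only [hS, Finset.mem_product, Finset.mem_Ico]
    exact ⟨⟨this.1, this.2.1⟩, this.2.2.1, this.2.2.2⟩
  have hcard : (pglOrbitList s v0 151).toFinset.card = 151 := by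
    rw [List.toFinset_card_of_nodup (hnodup 151 le_rfl)]
    simp [pglOrbitList]
  have hScard : S.card = 150 := by
    rw [hS, Finset.card_product, Int.card_Ico, Int.card_Ico]
    decide
  have := Finset.card_le_card hsub
  omega

-- the detection loop, started at state k of the orbit, stops at the first repeat L
theorem pgl_detect_go (s v0 : Int) (L : Nat)
    (hQL : pglOrbit s v0 L ∈ pglOrbitList s v0 L)
    (hmin : ∀ j, j < L → pglOrbit s v0 j ∉ pglOrbitList s v0 j) :
    ∀ (fuel k : Nat), k ≤ L → L < k + fuel →
      pglDetect s fuel (pglOrbitList s v0 k) (pglOrbit s v0 k)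
        = (pglOrbitList s v0 L, pglOrbit s v0 L) := by
  intro fuel
  induction fuel with
  | zero => intro k hk hf; omega
  | succ fuel ih =>
    intro k hk hf
    by_cases hkL : k = L
    · subst hkL
      simp [pglDetect, hQL]
    · have hklt : k < L := by omega
      simp only [pglDetect, if_neg (hmin k hklt)]
      rw [← pglOrbitList_succ,
        show pglStep s (pglOrbit s v0 k) = pglOrbit s v0 (k + 1) by
          unfold pglOrbit; rw [Function.iterate_succ_apply']]
      exact ih (k + 1) (by omega) (by omega)

-- list of a periodic function over an initial range: prefix + repeated cycle
theorem map_range_cycle {α : Type} (g : Nat → α) (mu lam r : Nat)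
    (hper : ∀ j, g (mu + j + lam) = g (mu + j)) :
    ∀ R, (List.range (R * lam + r)).map (fun j => g (mu + j))
      = (List.replicate R ((List.range lam).map (fun j => g (mu + j)))).flatten
          ++ (List.range r).map (fun j => g (mu + j)) := by
  intro R
  induction R with
  | zero => simp
  | succ R ih =>
    rw [show (R + 1) * lam + r = lam + (R * lam + r) by ring, List.range_add, List.map_append,
      List.map_map]
    have hfun : ((fun j => g (mu + j)) ∘ fun x => lam + x) = fun j => g (mu + j) := by
      funext j
      simp only [Function.comp]
      rw [show mu + (lam + j) = mu + j + lam by ring, hper]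
    rw [hfun, ih, List.replicate_succ, List.flatten_cons, List.append_assoc]

-- ===== VERDICT (by name: the statement is the Claim_ definition above) =====
theorem pattern_geometric_like_spec : Claim_equal_pattern_geometric_like := by
  intro a b length _
  unfold Spec_pattern_geometric_like
  simp only [pattern_geometric_like, pattern_geometric_like_alt]
  set a' : Int := if a = 0 then 1 else a with ha'
  set s : Int := if b ≠ a' then b - a' else 1 with hs
  set v0 : Int := PySem.Int.mod a' 50 with hv0
  have hv0b : 0 ≤ v0 ∧ v0 < 50 :=
    ⟨PySem.Int.mod_nonneg _ (by norm_num), PySem.Int.mod_lt _ (by norm_num)⟩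
  -- A's side: the orbit values
  rw [loopA_orbit s v0 length]
  -- B's side: the detection loop result
  obtain ⟨k0, hk0, hQk0⟩ := pgl_exists_repeat s v0 hv0b
  have hex : ∃ k, pglOrbit s v0 k ∈ pglOrbitList s v0 k := ⟨k0, hQk0⟩
  set L : Nat := Nat.find hex with hL
  have hQL : pglOrbit s v0 L ∈ pglOrbitList s v0 L := Nat.find_spec hex
  have hL150 : L ≤ 150 := le_trans (Nat.find_min' hex hQk0) hk0
  have hdet : pglDetect s 151 [] (v0, 1) = (pglOrbitList s v0 L, pglOrbit s v0 L) := by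
    have h0 : ([] : List (Int × Int)) = pglOrbitList s v0 0 := rfl
    have h1 : (v0, 1) = pglOrbit s v0 0 := rfl
    rw [h0, h1]
    exact pgl_detect_go s v0 L hQL (fun j hj => Nat.find_min hex hj) 151 0 (by omega) (by omega)
  rw [hdet]
  -- the found index mu
  obtain ⟨m, hm⟩ := Option.isSome_iff_exists.mp ((PySem.List.index?_isSome_iff _ _).mpr hQL)
  obtain ⟨hmlen, hmval, -⟩ := PySem.List.getElem_of_index?_eq_some hm
  have hLlen : (pglOrbitList s v0 L).length = L := by simp [pglOrbitList]
  have hmL : m < L := by omega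
  have horbmL : pglOrbit s v0 m = pglOrbit s v0 L := by
    rw [← hmval]; simp [pglOrbitList]
  rw [hm]
  simp only [Option.getD_some]
  -- vals is the orbit's value list
  have hvals : (pglOrbitList s v0 L).map Prod.fst
      = (List.range L).map (fun k => (pglOrbit s v0 k).1) := by
    simp [pglOrbitList, List.map_map, Function.comp]
  rw [hvals]
  set g : Nat → Int := fun k => (pglOrbit s v0 k).1 with hg
  have hlen : PySem.List.len ((List.range L).map g) = (L : Int) := by
    simp [PySem.List.len_eq]
  rw [hlen]
  set n : Int := max length 1 with hn
  have hn1 : 1 ≤ n := by omega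
  have hnN : ((n.toNat : Int)) = n := by omega
  by_cases hcase : n ≤ (L : Int)
  · rw [if_pos hcase, PySem.List.slice_to _ (by omega : (0 : Int) ≤ n)]
    rw [← List.map_take, List.take_range, show min n.toNat L = n.toNat by omega]
  · rw [if_neg hcase]
    set lam : Nat := L - m with hlam
    have hlam0 : 0 < lam := by omega
    -- periodicity of the orbit values from index m on
    have hper : ∀ j, g (m + j + lam) = g (m + j) := by
      intro j
      show (pglOrbit s v0 (m + j + lam)).1 = (pglOrbit s v0 (m + j)).1
      have : pglOrbit s v0 (m + j + lam) = pglOrbit s v0 (m + j) := by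
        have h1 : m + j + lam = j + L := by omega
        have h2 : m + j = j + m := by omega
        rw [h1, h2]
        unfold pglOrbit
        rw [Function.iterate_add_apply, Function.iterate_add_apply]
        rw [show (pglStep s)^[L] (v0, 1) = (pglStep s)^[m] (v0, 1) from horbmL.symm]
      rw [this]
    set nN : Nat := n.toNat with hnn
    have hLn : L < nN := by omega
    have hmn : m ≤ nN := by omega
    set R : Nat := (nN - m) / lam with hR
    set r : Nat := (nN - m) % lam with hr
    have hdm : lam * R + r = nN - m := Nat.div_add_mod (nN - m) lam
    have hdm' : R * lam + r = nN - m := by rw [Nat.mul_comm R lam]; exact hdm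
    have hrlt : r < lam := Nat.mod_lt _ hlam0
    -- the drop of vals is the cycle
    have hdrop : ((List.range L).map g).drop m
        = (List.range lam).map (fun j => g (m + j)) := by
      rw [show L = m + lam by omega, List.range_add, List.map_append, List.map_map]
      rw [List.drop_left' (by simp)]
      rfl
    have htake : PySem.List.slice ((List.range L).map g) none (some (m : Int))
        = (List.range m).map g := by
      rw [PySem.List.slice_to_natCast, ← List.map_take, List.take_range,
        show min m L = m by omega]
    rw [hdrop, htake]
    have hlenc : PySem.List.len ((List.range lam).map (fun j => g (m + j))) = (lam : Int) := by
      simp [PySem.List.len_eq]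
    rw [hlenc]
    have hcast : n - (m : Int) = ((nN - m : Nat) : Int) := by omega
    rw [hcast, PySem.Int.floordiv_natCast, PySem.Int.mod_natCast, ← hR, ← hr]
    rw [show PySem.List.pyRepeat ((List.range lam).map (fun j => g (m + j))) (R : Int)
        = (List.replicate R ((List.range lam).map (fun j => g (m + j)))).flatten by
      simp [PySem.List.pyRepeat]]
    rw [PySem.List.slice_to_natCast, ← List.map_take, List.take_range, show min r lam = r by omega]
    rw [show nN = m + (R * lam + r) by omega]
    rw [List.range_add, List.map_append, List.map_map]
    rw [show (g ∘ fun x => m + x) = fun j => g (m + j) from rfl]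
    rw [map_range_cycle g m lam r hper R, List.append_assoc]
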